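-- pv_equiv track=rewrite | github.com/bloodearnest/setsight | src/parse.py | tokenise_chords
-- ===== SOURCE A (Python) =====
-- def tokenise_chords(chord_line):
--     """Tokenise a chord line into separate items.
--
--     Valid tokens are: chords, |, and bracketed directives e.g. (To Chorus).
--     """
--     chords = []
--     chord = []
--     closer = None
--     brackets = {
--         '(': ')',
--         '[': ']',
--         '{': '}',
--     }
--
--     for c in chord_line:
--         if closer:
--             if c == closer:
--                 closer = None
--             chord.append(c)
--         elif c in brackets:
--             chord.append(c)
--             closer = brackets[c]
--         elif c in '| \t\n\r':
--             if chord: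
--                 chords.append(''.join(chord))
--             if c == '|':
--                 chords.append('|')
--             chord = []
--         else:
--             chord.append(c)
--
--     if chord:
--         chords.append(''.join(chord))
--
--     return chords
-- ===== SOURCE B (Python) =====
-- BRACKETS = {'(': ')', '[': ']', '{': '}'}
--
-- def tokenise_chords(chord_line):
--     """Tokenise a chord line into separate items.
--
--     Jump-based scan: on an opener, find the matching closer and take the
--     whole bracketed slice at once instead of tracking a closer state.
--     """
--     tokens = []
--     buf = ''
--     i = 0
--     n = len(chord_line)
--     while i < n:
--         c = chord_line[i]
--         if c in BRACKETS:
--             j = chord_line.find(BRACKETS[c], i + 1)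
--             if j == -1:
--                 buf += chord_line[i:]
--                 i = n
--             else:
--                 buf += chord_line[i:j + 1]
--                 i = j + 1
--         elif c in '| \t\n\r':
--             if buf:
--                 tokens.append(buf)
--                 buf = ''
--             if c == '|':
--                 tokens.append('|')
--             i += 1
--         else:
--             buf += c
--             i += 1
--     if buf:
--         tokens.append(buf)
--     return tokens
-- ===== Notes on version B (the rewrite author's own statement) =====
-- stated objective: alternative
-- what changed: Replaced the per-character closer-state machine with an index-based scan that, on an opening bracket, jumps straight to the matching closer via str.find and takes the whole bracketed slice at once.
import Mathlib
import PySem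

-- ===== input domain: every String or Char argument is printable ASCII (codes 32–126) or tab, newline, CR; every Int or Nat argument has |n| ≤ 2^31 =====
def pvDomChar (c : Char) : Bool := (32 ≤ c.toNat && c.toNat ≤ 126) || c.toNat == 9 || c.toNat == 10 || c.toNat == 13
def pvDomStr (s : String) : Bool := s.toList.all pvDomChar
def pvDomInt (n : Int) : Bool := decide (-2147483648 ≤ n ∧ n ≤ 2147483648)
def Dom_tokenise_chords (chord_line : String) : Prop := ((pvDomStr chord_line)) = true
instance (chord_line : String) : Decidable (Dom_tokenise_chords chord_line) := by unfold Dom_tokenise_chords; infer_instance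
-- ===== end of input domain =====

-- B replaces A's per-character closer-state machine with a scan that jumps over
-- each whole bracketed group at once (find the matching closer, take the slice);
-- objective: alternative structure, same result.

-- ===== PORT A =====
-- state: (chords, chord, closer); one step of A's for-loop body.
-- The 3-entry literal dict `brackets` is transliterated as the membership test
-- c ∈ {'(','[','{'} and the corresponding closer lookup.

def tokeniseStepA (st : List String × List Char × Option Char) (c : Char) :
    List String × List Char × Option Char :=
  match st with
  | (chords, chord, some cl) =>
      if c = cl then (chords, chord ++ [c], none) else (chords, chord ++ [c], some cl)
  | (chords, chord, none) =>
      if c = '(' ∨ c = '[' ∨ c = '{' then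
        (chords, chord ++ [c], some (if c = '(' then ')' else if c = '[' then ']' else '}'))
      else if c = '|' ∨ c = ' ' ∨ c = '\t' ∨ c = '\n' ∨ c = '\r' then
        ((if chord ≠ [] then chords ++ [String.mk chord] else chords) ++
           (if c = '|' then ["|"] else []), [], none)
      else (chords, chord ++ [c], none)

def tokenise_chords (chord_line : String) : List String :=
  match chord_line.toList.foldl tokeniseStepA ([], [], none) with
  | (chords, chord, _) => if chord ≠ [] then chords ++ [String.mk chord] else chords

-- ===== PORT B =====
-- B's while loop as recursion on the remaining characters;
-- chord_line.find(closer, i + 1) becomes rest.idxOf? cl on the suffix,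
-- and the two slice cases are take/drop at that index.
def tokeniseGoB : List Char → List Char → List String → List String
  | [], buf, toks => if buf ≠ [] then toks ++ [String.mk buf] else toks
  | c :: rest, buf, toks =>
      if c = '(' ∨ c = '[' ∨ c = '{' then
        let cl := if c = '(' then ')' else if c = '[' then ']' else '}'
        match rest.idxOf? cl with
        | none => tokeniseGoB [] (buf ++ c :: rest) toks
        | some j => tokeniseGoB (rest.drop (j + 1)) (buf ++ c :: rest.take (j + 1)) toks
      else if c = '|' ∨ c = ' ' ∨ c = '\t' ∨ c = '\n' ∨ c = '\r' then
        tokeniseGoB rest []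
          ((if buf ≠ [] then toks ++ [String.mk buf] else toks) ++
             (if c = '|' then ["|"] else []))
      else tokeniseGoB rest (buf ++ [c]) toks
termination_by l => l.length
decreasing_by all_goals (simp; try omega)


def tokenise_chords_alt (chord_line : String) : List String :=
  tokeniseGoB chord_line.toList [] []

-- ===== PRECONDITION & SPEC =====
def Spec_tokenise_chords (chord_line : String) (out : List String) : Prop := out = tokenise_chords_alt chord_line
instance (chord_line : String) (out : List String) : Decidable (Spec_tokenise_chords chord_line out) := by unfold Spec_tokenise_chords; infer_instance

-- ===== CLAIM (what is proved, stated in full; the proofs are below) =====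
def Claim_equal_tokenise_chords : Prop := ∀ (chord_line : String), Dom_tokenise_chords chord_line → Spec_tokenise_chords chord_line (tokenise_chords chord_line)

-- ===== LEMMAS AND PROOFS =====

-- A's final flush, applied to the fold state
def tokeniseFinish (st : List String × List Char × Option Char) : List String :=
  match st with
  | (chords, chord, _) => if chord ≠ [] then chords ++ [String.mk chord] else chords

theorem foldA_closer (l : List Char) (cl : Char) :
    ∀ (toks : List String) (buf : List Char),
      l.foldl tokeniseStepA (toks, buf, some cl) =
        match l.idxOf? cl with
        | none => (toks, buf ++ l, some cl)
        | some j => (l.drop (j + 1)).foldl tokeniseStepA (toks, buf ++ l.take (j + 1), none) := by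
  induction l with
  | nil => intro toks buf; simp
  | cons c t ih =>
      intro toks buf
      by_cases h : c = cl
      · subst h
        simp [List.foldl_cons, tokeniseStepA, List.idxOf?_cons]
      · have hbeq : (c == cl) = false := beq_false_of_ne h
        simp only [List.foldl_cons, tokeniseStepA, if_neg h]
        rw [ih toks (buf ++ [c])]
        simp only [List.idxOf?_cons, hbeq, Bool.false_eq_true, if_false]
        cases ht : t.idxOf? cl with
        | none => simp
        | some j => simp

theorem foldA_eq_goB (l : List Char) (buf : List Char) (toks : List String) :
      tokeniseFinish (l.foldl tokeniseStepA (toks, buf, none)) = tokeniseGoB l buf toks := by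
  induction l, buf, toks using tokeniseGoB.induct with
  | case1 buf toks h => simp [tokeniseFinish, tokeniseGoB, h]
  | case2 buf toks h => simp [tokeniseFinish, tokeniseGoB, h]
  | case3 c rest buf toks hop cl hfind ih =>
      rw [tokeniseGoB]
      simp only [hop, if_true, List.foldl_cons]
      rw [show tokeniseStepA (toks, buf, none) c =
            (toks, buf ++ [c], some (if c = '(' then ')' else if c = '[' then ']' else '}')) by
          simp [tokeniseStepA, hop]]
      rw [foldA_closer]
      have hfind' : List.idxOf? (if c = '(' then ')' else if c = '[' then ']' else '}') rest = none := hfind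
      rw [hfind']
      simpa using ih
  | case4 c rest buf toks hop cl j hfind ih =>
      rw [tokeniseGoB]
      simp only [hop, if_true, List.foldl_cons]
      rw [show tokeniseStepA (toks, buf, none) c =
            (toks, buf ++ [c], some (if c = '(' then ')' else if c = '[' then ']' else '}')) by
          simp [tokeniseStepA, hop]]
      rw [foldA_closer]
      have hfind' : List.idxOf? (if c = '(' then ')' else if c = '[' then ']' else '}') rest = some j := hfind
      rw [hfind']
      simpa using ih
  | case5 c rest buf toks hop hsep ih =>
      rw [tokeniseGoB]
      simp only [List.foldl_cons]
      rw [show tokeniseStepA (toks, buf, none) c =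
            ((if buf ≠ [] then toks ++ [String.mk buf] else toks) ++
               (if c = '|' then ["|"] else []), [], none) by
          simp [tokeniseStepA, hop, hsep]]
      simp only [hop, hsep, if_false, if_true]
      exact ih
  | case6 c rest buf toks hop hsep ih =>
      rw [tokeniseGoB]
      simp only [List.foldl_cons]
      rw [show tokeniseStepA (toks, buf, none) c = (toks, buf ++ [c], none) by
          simp [tokeniseStepA, hop, hsep]]
      simp only [hop, hsep, if_false]
      exact ih

-- ===== VERDICT (by name: the statement is the Claim_ definition above) =====
theorem tokenise_chords_spec : Claim_equal_tokenise_chords := by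
  intro s _
  unfold Spec_tokenise_chords tokenise_chords tokenise_chords_alt
  have := foldA_eq_goB s.toList [] []
  simpa [tokeniseFinish] using this
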